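-- pv_equiv track=rewrite | github.com/huu0224/python-study | 서버 증설 횟수.py | solution
-- ===== SOURCE A (Python) =====
-- def serverCount(serverList, startTime, endTime):
--     count = 0
--     if len(serverList) > 0:
--         for idx, val in enumerate(serverList):
--             s, e, l = val
--             if e == startTime:
--                 serverList[idx][2] = -1
--
--     for x, y, e in serverList:
--         if e == 0:
--             count += 1
--
--     return count
--
-- def solution(players, m, k):
--     answer = 0
--     serverList = []
--     maxPlayer = m
--
--     for idx, playerCount in enumerate(players):
--         startTime = idx + 1
--         endTime = startTime + k
--
--         aliveServer = serverCount(serverList, startTime, endTime)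
--
--         if playerCount >= (aliveServer + 1) * m:
--
--             serverAddCount = (playerCount - ((aliveServer + 1) * m)) // m + 1
--
--             for _ in range(serverAddCount):
--                 serverList.append([startTime, endTime, 0])
--
--             answer += serverAddCount
--
--     return answer
-- ===== SOURCE B (Python) =====
-- def solution(players, m, k):
--     # Running alive-count with an expiry schedule keyed by end hour:
--     # O(n) instead of rescanning the whole server list every hour.
--     answer = 0
--     alive = 0
--     expire = {}
--     for idx, playerCount in enumerate(players):
--         t = idx + 1
--         alive -= expire.get(t, 0)
--         if playerCount >= (alive + 1) * m:
--             add = playerCount // m - alive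
--             answer += add
--             alive += add
--             expire[t + k] = expire.get(t + k, 0) + add
--     return answer
-- ===== Notes on version B (the rewrite author's own statement) =====
-- stated objective: faster
-- what changed: Replaces the per-hour rescan-and-mark of the whole server list with a running alive counter plus an expiry dictionary keyed by end hour, updated incrementally.
-- outside the precondition, e.g. on solution([1], 0, 1): A raises ZeroDivisionError, B raises ZeroDivisionError; on solution([2, 2], -2, 5): A returns -2, B returns -1
import Mathlib
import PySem

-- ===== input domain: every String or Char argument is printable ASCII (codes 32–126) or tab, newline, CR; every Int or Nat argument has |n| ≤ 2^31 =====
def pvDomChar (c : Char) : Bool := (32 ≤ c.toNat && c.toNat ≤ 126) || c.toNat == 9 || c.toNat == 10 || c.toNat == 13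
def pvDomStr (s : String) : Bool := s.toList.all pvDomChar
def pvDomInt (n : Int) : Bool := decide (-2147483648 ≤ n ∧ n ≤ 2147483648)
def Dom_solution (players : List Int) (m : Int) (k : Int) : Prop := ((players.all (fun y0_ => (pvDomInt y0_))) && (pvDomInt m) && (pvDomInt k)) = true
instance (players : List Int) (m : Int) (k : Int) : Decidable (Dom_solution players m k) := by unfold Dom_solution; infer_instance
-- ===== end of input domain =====

-- B replaces A's per-hour rescan of the whole server list with a running alive
-- counter plus an expiry dictionary keyed by end hour (asymptotically faster).

-- ===== PORT A =====
-- Python serverCount mutates serverList (marks l := -1 where e == startTime),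
-- so the port returns the updated list together with the count.
def serverCountA (serverList : List (Int × Int × Int)) (startTime : Int) (endTime : Int) :
    List (Int × Int × Int) × Int :=
  -- the `if len(serverList) > 0` guard only wraps the (vacuous on []) marking loop
  let marked :=
    if serverList.length > 0 then
      serverList.map (fun v => if v.2.1 = startTime then (v.1, v.2.1, (-1 : Int)) else v)
    else serverList
  -- second loop: 'for x, y, e in serverList: if e == 0: count += 1' (e is the third slot)
  let count := marked.foldl (fun c v => if v.2.2 = 0 then c + 1 else c) (0 : Int)
  (marked, count)

def solutionGoA (m k : Int) : List Int → Int → List (Int × Int × Int) → Int → Int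
  | [], _, _, answer => answer
  | playerCount :: rest, idx, serverList, answer =>
    let startTime := idx + 1
    let endTime := startTime + k
    let r := serverCountA serverList startTime endTime
    let aliveServer := r.2
    if playerCount ≥ (aliveServer + 1) * m then
      let serverAddCount := PySem.Int.floordiv (playerCount - (aliveServer + 1) * m) m + 1
      let sl' := (PySem.List.pyRange 0 serverAddCount 1).foldl
        (fun acc _ => acc ++ [(startTime, endTime, (0 : Int))]) r.1
      solutionGoA m k rest (idx + 1) sl' (answer + serverAddCount)
    else
      solutionGoA m k rest (idx + 1) r.1 answer

def solution (players : List Int) (m : Int) (k : Int) : Int :=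
  solutionGoA m k players 0 [] 0

-- ===== PORT B =====
def solutionAltGo (m k : Int) : List Int → Int → Int → Int → PySem.Dict Int Int → Int
  | [], _, answer, _, _ => answer
  | playerCount :: rest, idx, answer, alive, expire =>
    let t := idx + 1
    let alive' := alive - expire.getD t 0
    if playerCount ≥ (alive' + 1) * m then
      let add := PySem.Int.floordiv playerCount m - alive'
      solutionAltGo m k rest (idx + 1) (answer + add) (alive' + add)
        (expire.insert (t + k) (expire.getD (t + k) 0 + add))
    else
      solutionAltGo m k rest (idx + 1) answer alive' expire

def solution_alt (players : List Int) (m : Int) (k : Int) : Int :=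
  solutionAltGo m k players 0 0 0 PySem.Dict.empty

-- ===== PRECONDITION & SPEC =====
-- Pre_ restricts to positive server capacity m ≥ 1, the problem's natural domain:
-- m = 0 makes A divide by zero as soon as any hour triggers the scale-up check, and
-- for m < 0 A returns accidental negative scale-up counts no implementation would specify.
def Pre_solution (players : List Int) (m : Int) (k : Int) : Prop := 1 ≤ m
instance (players : List Int) (m : Int) (k : Int) : Decidable (Pre_solution players m k) := by
  unfold Pre_solution; infer_instance

def pvWitness_solution : List Int × Int × Int := ([4, 1, 7], 3, 2)

def Spec_solution (players : List Int) (m : Int) (k : Int) (out : Int) : Prop := out = solution_alt players m k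
instance (players : List Int) (m : Int) (k : Int) (out : Int) : Decidable (Spec_solution players m k out) := by unfold Spec_solution; infer_instance

-- ===== CLAIM (what is proved, stated in full; the proofs are below) =====
def Claim_equal_solution : Prop := ∀ (players : List Int) (m : Int) (k : Int), Dom_solution players m k → Pre_solution players m k → Spec_solution players m k (solution players m k)

-- ===== LEMMAS AND PROOFS =====

-- number of servers still marked alive (l = 0)
def cnt0 : List (Int × Int × Int) → Int
  | [] => 0
  | v :: L => (if v.2.2 = 0 then 1 else 0) + cnt0 L

-- number of alive servers whose end time is h
def cntE (h : Int) : List (Int × Int × Int) → Int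
  | [] => 0
  | v :: L => (if v.2.1 = h ∧ v.2.2 = 0 then 1 else 0) + cntE h L

lemma foldl_cnt0 (L : List (Int × Int × Int)) (c : Int) :
    L.foldl (fun c v => if v.2.2 = 0 then c + 1 else c) c = c + cnt0 L := by
  induction L generalizing c with
  | nil => simp [cnt0]
  | cons v L ih => simp only [List.foldl_cons, cnt0, ih]; split <;> ring

lemma cnt0_mark (L : List (Int × Int × Int)) (t : Int) :
    cnt0 (L.map (fun v => if v.2.1 = t then (v.1, v.2.1, (-1 : Int)) else v))
      = cnt0 L - cntE t L := by
  induction L with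
  | nil => simp [cnt0, cntE]
  | cons v L ih =>
    simp only [List.map_cons, cnt0, cntE, ih]
    by_cases h1 : v.2.1 = t <;> by_cases h2 : v.2.2 = 0 <;> simp [h1, h2] <;> ring

lemma cntE_mark (L : List (Int × Int × Int)) (t h : Int) :
    cntE h (L.map (fun v => if v.2.1 = t then (v.1, v.2.1, (-1 : Int)) else v))
      = if h = t then 0 else cntE h L := by
  induction L with
  | nil => simp [cntE]
  | cons v L ih =>
    simp only [List.map_cons, cntE, ih]
    by_cases h1 : v.2.1 = t <;> by_cases ht : h = t <;>
      simp [h1, ht, cntE] <;> omega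

lemma cnt0_append (L M : List (Int × Int × Int)) : cnt0 (L ++ M) = cnt0 L + cnt0 M := by
  induction L with
  | nil => simp [cnt0]
  | cons v L ih => simp [cnt0, ih]; ring

lemma cntE_append (h : Int) (L M : List (Int × Int × Int)) :
    cntE h (L ++ M) = cntE h L + cntE h M := by
  induction L with
  | nil => simp [cntE]
  | cons v L ih => simp [cntE, ih]; ring

lemma cnt0_foldl_append (ys : List Int) (s e : Int) :
    ∀ sl, cnt0 (ys.foldl (fun acc _ => acc ++ [(s, e, (0 : Int))]) sl)
      = cnt0 sl + ys.length := by
  induction ys with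
  | nil => intro sl; simp
  | cons y ys ih =>
    intro sl
    simp only [List.foldl_cons, ih, cnt0_append, cnt0, List.length_cons]
    push_cast; ring

lemma cntE_foldl_append (ys : List Int) (s e h : Int) :
    ∀ sl, cntE h (ys.foldl (fun acc _ => acc ++ [(s, e, (0 : Int))]) sl)
      = cntE h sl + if h = e then (ys.length : Int) else 0 := by
  induction ys with
  | nil => intro sl; simp
  | cons y ys ih =>
    intro sl
    simp only [List.foldl_cons, ih, cntE_append, cntE, List.length_cons]
    by_cases he : h = e
    · simp only [he, if_pos rfl, and_true]
      push_cast; ring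
    · have h2 : ¬ e = h := fun hh => he hh.symm
      simp [he, h2]

lemma floordiv_shift (p a m : Int) (hm : 0 < m) :
    PySem.Int.floordiv (p - (a + 1) * m) m = PySem.Int.floordiv p m - (a + 1) := by
  rw [PySem.Int.floordiv_eq_ediv_of_pos hm, PySem.Int.floordiv_eq_ediv_of_pos hm]
  have : p - (a + 1) * m = p + (-(a + 1)) * m := by ring
  rw [this, Int.add_mul_ediv_right _ _ (by omega : m ≠ 0)]
  ring

-- the heart: the fold invariant relating A's server list to B's (alive, expire) state
lemma go_eq (m k : Int) (hm : 1 ≤ m) :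
    ∀ (ps : List Int) (idx : Int) (L : List (Int × Int × Int))
      (ans alive : Int) (ex : PySem.Dict Int Int),
      alive = cnt0 L →
      (∀ h : Int, idx + 1 ≤ h → ex.getD h 0 = cntE h L) →
      solutionGoA m k ps idx L ans = solutionAltGo m k ps idx ans alive ex := by
  intro ps
  induction ps with
  | nil => intro idx L ans alive ex _ _; rfl
  | cons p ps ih =>
    intro idx L ans alive ex hAlive hEx
    have hext := hEx (idx + 1) (le_refl _)
    have hmark : cnt0 (serverCountA L (idx + 1) (idx + 1 + k)).1
        = cnt0 L - cntE (idx + 1) L := by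
      show cnt0 (if L.length > 0 then
        L.map (fun v => if v.2.1 = idx + 1 then (v.1, v.2.1, (-1 : Int)) else v) else L)
        = cnt0 L - cntE (idx + 1) L
      rcases L with _ | ⟨v, L'⟩
      · simp [cnt0, cntE]
      · simpa using cnt0_mark (v :: L') (idx + 1)
    have hmarkE : ∀ h : Int, cntE h (serverCountA L (idx + 1) (idx + 1 + k)).1
        = if h = idx + 1 then 0 else cntE h L := by
      intro h
      show cntE h (if L.length > 0 then
        L.map (fun v => if v.2.1 = idx + 1 then (v.1, v.2.1, (-1 : Int)) else v) else L)
        = if h = idx + 1 then 0 else cntE h L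
      rcases L with _ | ⟨v, L'⟩
      · simp [cntE]
      · simpa using cntE_mark (v :: L') (idx + 1) h
    -- A's alive count equals B's updated alive
    have haliveEq : (serverCountA L (idx + 1) (idx + 1 + k)).2
        = alive - ex.getD (idx + 1) 0 := by
      show ((serverCountA L (idx + 1) (idx + 1 + k)).1.foldl
          (fun c v => if v.2.2 = 0 then c + 1 else c) (0 : Int))
        = alive - ex.getD (idx + 1) 0
      rw [foldl_cnt0, hmark, hAlive, hext]
      ring
    simp only [solutionGoA, solutionAltGo, haliveEq]
    set a := alive - ex.getD (idx + 1) 0 with ha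
    by_cases hc : p ≥ (a + 1) * m
    · simp only [hc, if_pos]
      have hn : PySem.Int.floordiv (p - (a + 1) * m) m + 1
          = PySem.Int.floordiv p m - a := by
        rw [floordiv_shift p a m (by omega)]; ring
      have hge : a + 1 ≤ PySem.Int.floordiv p m := by
        rw [ge_iff_le, ← PySem.Int.le_floordiv_iff_mul_le (by omega : (0:Int) < m)] at hc
        exact hc
      rw [hn]
      have hlen : ((PySem.List.pyRange 0 (PySem.Int.floordiv p m - a) 1).length : Int)
          = PySem.Int.floordiv p m - a := by
        rw [PySem.List.length_pyRange_one]; omega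
      apply ih
      · -- alive invariant
        rw [cnt0_foldl_append, hmark, hlen]
        omega
      · -- expiry invariant
        intro h hh
        rw [cntE_foldl_append, hmarkE, PySem.Dict.getD_insert]
        by_cases hk : h = idx + 1 + k
        · subst hk
          have hne : ¬ idx + 1 + k = idx + 1 := by omega
          simp only [if_pos rfl, if_neg hne]
          rw [hEx (idx + 1 + k) (by omega), hlen]
          simp
        · have hne2 : ¬ h = idx + 1 := by omega
          simp only [if_neg hk, if_neg hne2, add_zero]
          exact hEx h (by omega)
    · simp only [hc, if_neg, ite_false]
      apply ih
      · rw [hmark, ha, hAlive, hext]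
      · intro h hh
        rw [hmarkE, if_neg (by omega : ¬ h = idx + 1)]
        exact hEx h (by omega)

-- ===== VERDICT (by name: the statement is the Claim_ definition above) =====
theorem solution_spec : Claim_equal_solution := by
  intro players m k _ hpre
  show solution players m k = solution_alt players m k
  unfold solution solution_alt
  exact go_eq m k hpre players 0 [] 0 0 PySem.Dict.empty (by simp [cnt0])
    (by intro h _; simp [cntE, PySem.Dict.getD_empty])
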